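-- pv_equiv track=rewrite | github.com/language-ml/parsi.io | parsi_io/modules/quranic_extractions.py | break_to_subsequent_spans
-- ===== SOURCE A (Python) =====
-- def break_to_subsequent_spans(l: list):
--     segmented_list = [[l[0][0]]]
--     # breakpoint()
--     span_len = 1
--     for x, label in l[1:]:
--         if (x - span_len != segmented_list[-1][-1]) or (label == 1):
--             segmented_list[-1].append(segmented_list[-1][-1] + span_len)
--             segmented_list.append([x])
--             span_len = 1
--         else:
--             span_len += 1
--     segmented_list[-1].append(segmented_list[-1][-1] + span_len)
--     return segmented_list
-- ===== SOURCE B (Python) =====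
-- def break_to_subsequent_spans(l: list):
--     # boundary pairs: each adjacent (prev, cur) where a new span starts at cur
--     breaks = [(p, x) for (p, _), (x, lab) in zip(l, l[1:]) if x != p + 1 or lab == 1]
--     starts = [l[0][0]] + [x for _, x in breaks]
--     ends = [p + 1 for p, _ in breaks] + [l[-1][0] + 1]
--     return [[s, e] for s, e in zip(starts, ends)]
-- ===== Notes on version B (the rewrite author's own statement) =====
-- stated objective: alternative
-- what changed: B keeps no running state at all: it zips the list with its own tail to compute the set of boundary pairs in one comprehension, derives the start list and the end list independently from those boundaries, and zips starts with ends, instead of A's single stateful loop mutating the tail of the output with a span_len counter.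
import Mathlib
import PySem

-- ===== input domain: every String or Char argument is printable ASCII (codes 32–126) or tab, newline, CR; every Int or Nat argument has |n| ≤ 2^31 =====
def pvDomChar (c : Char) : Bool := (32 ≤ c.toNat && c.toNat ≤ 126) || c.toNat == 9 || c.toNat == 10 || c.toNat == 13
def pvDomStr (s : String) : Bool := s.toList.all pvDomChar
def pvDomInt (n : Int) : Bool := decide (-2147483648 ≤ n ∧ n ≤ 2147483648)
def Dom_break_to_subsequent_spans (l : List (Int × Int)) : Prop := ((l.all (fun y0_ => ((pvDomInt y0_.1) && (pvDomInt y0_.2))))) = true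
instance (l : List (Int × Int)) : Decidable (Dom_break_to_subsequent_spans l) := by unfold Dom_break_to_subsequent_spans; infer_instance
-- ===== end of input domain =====

-- B replaces A's stateful loop (span_len counter, in-place tail mutation) by a stateless
-- staged construction: boundary pairs from zipping the list with its tail, then the start
-- and end lists derived independently and zipped together.

-- ===== PORT A =====
-- segmented_list[-1][-1]  (both lists nonempty on every reached state)
def pvLastLast (seg : List (List Int)) : Int := (seg.getLast?.getD []).getLast?.getD 0

-- segmented_list[-1].append(v)
def pvAppendLast (seg : List (List Int)) (v : Int) : List (List Int) :=
  match seg with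
  | [] => []
  | [g] => [g ++ [v]]
  | g :: rest => g :: pvAppendLast rest v

def break_to_subsequent_spans (l : List (Int × Int)) : List (List Int) :=
  match l with
  | [] => []   -- Python raises IndexError here; excluded by Pre_
  | h :: t =>
    let st := t.foldl (fun (st : List (List Int) × Int) (p : Int × Int) =>
      let seg := st.1
      let span := st.2
      if p.1 - span ≠ pvLastLast seg ∨ p.2 = 1 then
        (pvAppendLast seg (pvLastLast seg + span) ++ [[p.1]], 1)
      else
        (seg, span + 1)) ([[h.1]], (1 : Int))
    pvAppendLast st.1 (pvLastLast st.1 + st.2)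

-- ===== PORT B =====
def break_to_subsequent_spans_alt (l : List (Int × Int)) : List (List Int) :=
  match l with
  | [] => []   -- Python raises IndexError here (l[0][0]); excluded by Pre_
  | h :: t =>
    -- breaks = [(p, x) for (p,_),(x,lab) in zip(l, l[1:]) if x != p+1 or lab == 1]
    let breaks := ((h :: t).zip t).filterMap (fun pq =>
      if pq.2.1 ≠ pq.1.1 + 1 ∨ pq.2.2 = 1 then some (pq.1.1, pq.2.1) else none)
    -- starts = [l[0][0]] + [x for _, x in breaks]
    let starts := h.1 :: breaks.map (fun b => b.2)
    -- ends = [p + 1 for p, _ in breaks] + [l[-1][0] + 1]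
    let ends := breaks.map (fun b => b.1 + 1) ++ [((h :: t).getLast?.getD (0, 0)).1 + 1]
    -- [[s, e] for s, e in zip(starts, ends)]
    (starts.zip ends).map (fun se => [se.1, se.2])

-- ===== PRECONDITION & SPEC =====
-- Pre_ excludes only the empty list, on which both Pythons raise IndexError (l[0][0]).
def Pre_break_to_subsequent_spans (l : List (Int × Int)) : Prop := l ≠ []
instance (l : List (Int × Int)) : Decidable (Pre_break_to_subsequent_spans l) := by
  unfold Pre_break_to_subsequent_spans; infer_instance

def pvWitness_break_to_subsequent_spans : (List (Int × Int)) := [(1, 0), (2, 0), (5, 1)]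

def Spec_break_to_subsequent_spans (l : List (Int × Int)) (out : List (List Int)) : Prop := out = break_to_subsequent_spans_alt l
instance (l : List (Int × Int)) (out : List (List Int)) : Decidable (Spec_break_to_subsequent_spans l out) := by unfold Spec_break_to_subsequent_spans; infer_instance

-- ===== CLAIM (what is proved, stated in full; the proofs are below) =====
def Claim_equal_break_to_subsequent_spans : Prop := ∀ (l : List (Int × Int)), Dom_break_to_subsequent_spans l → Pre_break_to_subsequent_spans l → Spec_break_to_subsequent_spans l (break_to_subsequent_spans l)

-- ===== LEMMAS AND PROOFS =====

-- reference recursion: spans of (x0,…,prev) followed by the rest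
def refSpans (x0 prev : Int) (rest : List (Int × Int)) : List (List Int) :=
  match rest with
  | [] => [[x0, prev + 1]]
  | p :: r => if p.1 ≠ prev + 1 ∨ p.2 = 1 then [x0, prev + 1] :: refSpans p.1 p.1 r
              else refSpans x0 p.1 r

-- replace the start of the first span
def repSt (a : Int) (gs : List (List Int)) : List (List Int) :=
  match gs with
  | [] => []
  | g :: rest => (a :: g.tail) :: rest

theorem pvLastLast_snoc (xs : List (List Int)) (a : Int) :
    pvLastLast (xs ++ [[a]]) = a := by
  simp [pvLastLast]

theorem pvAppendLast_snoc (xs : List (List Int)) (g : List Int) (v : Int) :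
    pvAppendLast (xs ++ [g]) v = xs ++ [g ++ [v]] := by
  induction xs with
  | nil => simp [pvAppendLast]
  | cons x xs ih =>
    cases xs with
    | nil => simp [pvAppendLast]
    | cons y ys => simpa [pvAppendLast] using ih

-- A's loop computes gs ++ refSpans x0 (x0 + span - 1) t
theorem pvA_loop (t : List (Int × Int)) :
    ∀ (gs : List (List Int)) (x0 span : Int),
    (let st := t.foldl (fun (st : List (List Int) × Int) (p : Int × Int) =>
        let seg := st.1
        let span := st.2
        if p.1 - span ≠ pvLastLast seg ∨ p.2 = 1 then
          (pvAppendLast seg (pvLastLast seg + span) ++ [[p.1]], 1)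
        else
          (seg, span + 1)) (gs ++ [[x0]], span)
     pvAppendLast st.1 (pvLastLast st.1 + st.2))
    = gs ++ refSpans x0 (x0 + span - 1) t := by
  induction t with
  | nil =>
    intro gs x0 span
    simp only [List.foldl_nil]
    rw [pvAppendLast_snoc, pvLastLast_snoc, refSpans]
    have : x0 + span - 1 + 1 = x0 + span := by ring
    simp [this]
  | cons p t ih =>
    intro gs x0 span
    simp only [List.foldl_cons, pvLastLast_snoc]
    have hcond : (p.1 - span ≠ x0 ∨ p.2 = 1) ↔ (p.1 ≠ (x0 + span - 1) + 1 ∨ p.2 = 1) := by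
      constructor <;> intro h <;> rcases h with h | h
      · left; omega
      · right; exact h
      · left; omega
      · right; exact h
    by_cases hc : p.1 ≠ (x0 + span - 1) + 1 ∨ p.2 = 1
    · rw [if_pos (hcond.mpr hc)]
      rw [pvAppendLast_snoc]
      have h2 : x0 + span - 1 + 1 = x0 + span := by ring
      have := ih (gs ++ [[x0, x0 + span]]) p.1 1
      simp only [List.append_assoc, List.cons_append, List.nil_append] at this ⊢
      rw [this, refSpans, if_pos hc, h2]
      have h1 : p.1 + 1 - 1 = p.1 := by ring
      rw [h1]
    · rw [if_neg (fun h => hc (hcond.mp h))]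
      rw [ih gs x0 (span + 1), refSpans, if_neg hc]
      rw [not_or, not_not] at hc
      have : x0 + (span + 1) - 1 = p.1 := by omega
      rw [this]

-- refSpans only uses x0 in the first span's start
theorem refSpans_repSt (r : List (Int × Int)) :
    ∀ (a b p : Int), refSpans a p r = repSt a (refSpans b p r) := by
  induction r with
  | nil => intro a b p; simp [refSpans, repSt]
  | cons q r ih =>
    intro a b p
    by_cases hc : q.1 ≠ p + 1 ∨ q.2 = 1
    · simp [refSpans, if_pos hc, repSt]
    · simp only [refSpans, if_neg hc]
      exact ih a b q.1

-- B's body (for a cons list) equals refSpans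
theorem pvB_eq (t : List (Int × Int)) :
    ∀ (h : Int × Int), break_to_subsequent_spans_alt (h :: t) = refSpans h.1 h.1 t := by
  induction t with
  | nil =>
    intro h
    simp [break_to_subsequent_spans_alt, refSpans]
  | cons q t ih =>
    intro h
    simp only [break_to_subsequent_spans_alt] at ih ⊢
    simp only [List.zip_cons_cons, List.filterMap_cons]
    by_cases hc : q.1 ≠ h.1 + 1 ∨ q.2 = 1
    · rw [if_pos hc]
      have hlast : ((h :: q :: t).getLast?.getD ((0:Int), (0:Int))) = ((q :: t).getLast?.getD ((0:Int), (0:Int))) := by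
        simp [List.getLast?_cons_cons]
      rw [hlast, refSpans, if_pos hc]
      simp only [List.map_cons, List.cons_append, List.zip_cons_cons]
      rw [ih q]
    · rw [if_neg hc]
      rw [refSpans, if_neg hc]
      rw [refSpans_repSt t h.1 q.1 q.1, ← ih q]
      have hlast : ((h :: q :: t).getLast?.getD ((0:Int), (0:Int))) = ((q :: t).getLast?.getD ((0:Int), (0:Int))) := by
        simp [List.getLast?_cons_cons]
      rw [hlast]
      -- both sides: zip of (x :: M) with (F ++ [c]); only the head start differs
      cases hM : (((q :: t).zip t).filterMap (fun pq =>
          if pq.2.1 ≠ pq.1.1 + 1 ∨ pq.2.2 = 1 then some (pq.1.1, pq.2.1) else none)).map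
          (fun b => b.1 + 1) with
      | nil => simp [repSt]
      | cons e E => simp [repSt, List.zip_cons_cons]

-- ===== VERDICT (by name: the statement is the Claim_ definition above) =====
theorem break_to_subsequent_spans_spec : Claim_equal_break_to_subsequent_spans := by
  intro l _ hpre
  cases l with
  | nil => exact absurd rfl hpre
  | cons h t =>
    show break_to_subsequent_spans (h :: t) = break_to_subsequent_spans_alt (h :: t)
    rw [pvB_eq t h]
    have := pvA_loop t [] h.1 1
    simpa [break_to_subsequent_spans] using this
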